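-- pv_equiv track=rewrite | github.com/MihaiOsan/GenetiProgrammingDJSP | generateDynamicFromStaticFJSP.py | calculate_min_max_processing_times_per_machine
-- ===== SOURCE A (Python) =====
-- def calculate_min_max_processing_times_per_machine(num_machines, jobs):
--     machine_processing_times = {m: [] for m in range(num_machines)}
--
--     # Adunăm timpii de procesare pentru fiecare mașină
--     for job in jobs:
--         for operation in job:
--             for machine, time in operation:
--                 machine_processing_times[machine].append(time)
--
--     # Calculăm timpii minim și maxim pentru fiecare mașină
--     machine_min_max_times = {}
--     all_times = [time for times in machine_processing_times.values() for time in times if times]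
--     global_min = min(all_times) if all_times else 10
--     global_max = max(all_times) if all_times else 100
--
--     for machine, times in machine_processing_times.items():
--         if times:  # Dacă există timpi pentru această mașină
--             machine_min_max_times[machine] = (min(times), max(times))
--         else:  # Dacă nu există operații pentru această mașină
--             machine_min_max_times[machine] = (global_min, global_max)
--
--     return machine_min_max_times
-- ===== SOURCE B (Python) =====
-- def calculate_min_max_processing_times_per_machine(num_machines, jobs):
--     pairs = sorted((p for job in jobs for op in job for p in op), key=lambda p: p[1])
--     first_seen = {}
--     last_seen = {}
--     for m, t in pairs:
--         if m not in first_seen: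
--             first_seen[m] = t
--         last_seen[m] = t
--     global_min = pairs[0][1] if pairs else 10
--     global_max = pairs[-1][1] if pairs else 100
--     return {m: (first_seen[m], last_seen[m]) if m in first_seen else (global_min, global_max)
--             for m in range(num_machines)}
-- ===== Notes on version B (the rewrite author's own statement) =====
-- stated objective: alternative
-- what changed: B replaces A's dict-of-lists bucketing and per-bucket min()/max() calls by sort-then-scan: it flattens the jobs once, sorts the (machine, time) pairs by time, and in a single sweep records each machine's first-seen and last-seen time, which by the sort order are exactly its min and max; the global fallback extremes are read off the two ends of the sorted list instead of a min/max over a rebuilt flat list.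
import Mathlib
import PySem

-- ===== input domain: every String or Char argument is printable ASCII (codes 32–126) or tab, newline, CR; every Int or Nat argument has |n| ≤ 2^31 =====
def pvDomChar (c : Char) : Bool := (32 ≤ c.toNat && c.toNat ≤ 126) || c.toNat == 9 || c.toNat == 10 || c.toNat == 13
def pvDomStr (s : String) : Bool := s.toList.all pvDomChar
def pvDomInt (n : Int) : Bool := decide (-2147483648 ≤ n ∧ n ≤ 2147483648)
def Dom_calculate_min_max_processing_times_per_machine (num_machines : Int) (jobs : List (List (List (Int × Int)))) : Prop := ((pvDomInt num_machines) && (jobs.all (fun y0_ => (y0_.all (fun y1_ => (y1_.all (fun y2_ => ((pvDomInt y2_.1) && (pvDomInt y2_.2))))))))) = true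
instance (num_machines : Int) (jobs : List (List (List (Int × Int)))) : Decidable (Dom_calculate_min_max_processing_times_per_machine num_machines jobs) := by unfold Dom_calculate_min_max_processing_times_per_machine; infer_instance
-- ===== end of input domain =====

-- B replaces A's dict-of-lists bucketing by sort-then-scan: flatten, sort by time, one sweep
-- records each machine's first and last time (its min and max), globals come from the sorted
-- ends (same return value for every input A accepts).

-- ===== PORT A =====
-- Literal transliteration of A. The 'modify' in the append loop equals Python's
-- 'machine_processing_times[machine].append(time)' whenever the key is present, which Pre_ guarantees
-- (Python raises KeyError otherwise; those inputs are outside Pre_).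
def calculate_min_max_processing_times_per_machine (num_machines : Int) (jobs : List (List (List (Int × Int)))) : List (Int × Int × Int) :=
  let mpt0 : PySem.Dict Int (List Int) :=
    (PySem.List.pyRange 0 num_machines 1).foldl (fun d m => d.insert m []) PySem.Dict.empty
  let mpt : PySem.Dict Int (List Int) :=
    jobs.foldl (fun d job =>
      job.foldl (fun d operation =>
        operation.foldl (fun d mt => d.modify mt.1 [] (fun x => x ++ [mt.2])) d) d) mpt0
  let all_times : List Int := mpt.values.flatMap (fun times => times.filter (fun _ => decide (times ≠ [])))
  let global_min : Int := (PySem.List.min? all_times (fun t => t)).getD 10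
  let global_max : Int := (PySem.List.max? all_times (fun t => t)).getD 100
  let res : PySem.Dict Int (Int × Int) :=
    mpt.items.foldl (fun d p =>
      if p.2 ≠ [] then
        d.insert p.1 ((PySem.List.min? p.2 (fun t => t)).getD 0, (PySem.List.max? p.2 (fun t => t)).getD 0)
      else
        d.insert p.1 (global_min, global_max)) PySem.Dict.empty
  res.items

-- ===== PORT B =====
-- Literal transliteration of Source B: flatten, sort by time, one sweep recording each machine's first
-- and last time (first = min, last = max, since the list is time-sorted), globals from the sorted
-- ends; '.getD 0' on pyGet?/get? is only reached under the guards, where Python returns normally.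
def calculate_min_max_processing_times_per_machine_alt (num_machines : Int) (jobs : List (List (List (Int × Int)))) : List (Int × Int × Int) :=
  let pairs : List (Int × Int) :=
    PySem.List.sorted (jobs.flatMap (fun job => job.flatMap (fun op => op))) (fun p => p.2) false
  let fl : PySem.Dict Int Int × PySem.Dict Int Int :=
    pairs.foldl (fun fl p =>
      ((if fl.1.contains p.1 then fl.1 else fl.1.insert p.1 p.2), fl.2.insert p.1 p.2))
      (PySem.Dict.empty, PySem.Dict.empty)
  let global_min : Int := if pairs ≠ [] then ((PySem.List.pyGet? pairs 0).map (fun p => p.2)).getD 0 else 10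
  let global_max : Int := if pairs ≠ [] then ((PySem.List.pyGet? pairs (-1)).map (fun p => p.2)).getD 0 else 100
  let result : PySem.Dict Int (Int × Int) :=
    (PySem.List.pyRange 0 num_machines 1).foldl (fun d m =>
      d.insert m (if fl.1.contains m then ((fl.1.get? m).getD 0, (fl.2.get? m).getD 0) else (global_min, global_max)))
      PySem.Dict.empty
  result.items

-- ===== PRECONDITION & SPEC =====
-- Pre_ excludes exactly the inputs on which A raises KeyError: some (machine, time) pair whose
-- machine id is not in range(num_machines).
def Pre_calculate_min_max_processing_times_per_machine (num_machines : Int) (jobs : List (List (List (Int × Int)))) : Prop :=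
  ∀ job ∈ jobs, ∀ op ∈ job, ∀ mt ∈ op, 0 ≤ mt.1 ∧ mt.1 < num_machines
instance (num_machines : Int) (jobs : List (List (List (Int × Int)))) : Decidable (Pre_calculate_min_max_processing_times_per_machine num_machines jobs) := by unfold Pre_calculate_min_max_processing_times_per_machine; infer_instance
def pvWitness_calculate_min_max_processing_times_per_machine : Int × (List (List (List (Int × Int)))) :=
  (2, [[[(0, 3), (1, 7)]], [[(0, 5)]]])

def Spec_calculate_min_max_processing_times_per_machine (num_machines : Int) (jobs : List (List (List (Int × Int)))) (out : List (Int × Int × Int)) : Prop := out = calculate_min_max_processing_times_per_machine_alt num_machines jobs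
instance (num_machines : Int) (jobs : List (List (List (Int × Int)))) (out : List (Int × Int × Int)) : Decidable (Spec_calculate_min_max_processing_times_per_machine num_machines jobs out) := by unfold Spec_calculate_min_max_processing_times_per_machine; infer_instance

-- ===== CLAIM (what is proved, stated in full; the proofs are below) =====
def Claim_equal_calculate_min_max_processing_times_per_machine : Prop := ∀ (num_machines : Int) (jobs : List (List (List (Int × Int)))), Dom_calculate_min_max_processing_times_per_machine num_machines jobs → Pre_calculate_min_max_processing_times_per_machine num_machines jobs → Spec_calculate_min_max_processing_times_per_machine num_machines jobs (calculate_min_max_processing_times_per_machine num_machines jobs)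

-- ===== LEMMAS AND PROOFS =====

-- updating a set with elements it already has leaves it unchanged
lemma set_update_of_mem (s : PySem.Set Int) (l : List Int) (h : ∀ x ∈ l, x ∈ s) :
    PySem.Set.update s l = s := by
  induction l generalizing s with
  | nil => rfl
  | cons x t ih =>
      have hx : PySem.Set.add s x = s := PySem.Set.add_of_mem (h x (by simp))
      show List.foldl PySem.Set.add (PySem.Set.add s x) t = s
      rw [hx]
      exact ih s (fun y hy => h y (by simp [hy]))

-- a filter with the constant condition "the list is nonempty" is the identity
lemma filter_const_ne_nil (l : List Int) : l.filter (fun _ => decide (l ≠ [])) = l := by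
  cases l with
  | nil => rfl
  | cons x t => simp

-- min over the identity key only depends on the set of members
lemma min?_id_congr (l1 l2 : List Int) (h : ∀ x, x ∈ l1 ↔ x ∈ l2) :
    PySem.List.min? l1 (fun t => t) = PySem.List.min? l2 (fun t => t) := by
  cases h1 : PySem.List.min? l1 (fun t => t) with
  | none =>
      rw [PySem.List.min?_eq_none_iff] at h1
      cases h2 : PySem.List.min? l2 (fun t => t) with
      | none => rfl
      | some m => exact absurd ((h m).mpr (PySem.List.min?_mem h2)) (by simp [h1])
  | some m =>
      cases h2 : PySem.List.min? l2 (fun t => t) with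
      | none =>
          rw [PySem.List.min?_eq_none_iff] at h2
          exact absurd ((h m).mp (PySem.List.min?_mem h1)) (by simp [h2])
      | some m' =>
          have hm : m ∈ l2 := (h m).mp (PySem.List.min?_mem h1)
          have hm' : m' ∈ l1 := (h m').mpr (PySem.List.min?_mem h2)
          exact congrArg some (le_antisymm (PySem.List.min?_isMin h1 m' hm') (PySem.List.min?_isMin h2 m hm))

lemma max?_id_congr (l1 l2 : List Int) (h : ∀ x, x ∈ l1 ↔ x ∈ l2) :
    PySem.List.max? l1 (fun t => t) = PySem.List.max? l2 (fun t => t) := by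
  cases h1 : PySem.List.max? l1 (fun t => t) with
  | none =>
      rw [PySem.List.max?_eq_none_iff] at h1
      cases h2 : PySem.List.max? l2 (fun t => t) with
      | none => rfl
      | some m => exact absurd ((h m).mpr (PySem.List.max?_mem h2)) (by simp [h1])
  | some m =>
      cases h2 : PySem.List.max? l2 (fun t => t) with
      | none =>
          rw [PySem.List.max?_eq_none_iff] at h2
          exact absurd ((h m).mp (PySem.List.max?_mem h1)) (by simp [h2])
      | some m' =>
          have hm : m ∈ l2 := (h m).mp (PySem.List.max?_mem h1)
          have hm' : m' ∈ l1 := (h m').mpr (PySem.List.max?_mem h2)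
          exact congrArg some (le_antisymm (PySem.List.max?_isMax h2 m hm) (PySem.List.max?_isMax h1 m' hm'))

-- the seeded dict: items are the machine range with empty lists
lemma mpt0_items (num_machines : Int) :
    ((PySem.List.pyRange 0 num_machines 1).foldl (fun d m => d.insert m []) (PySem.Dict.empty : PySem.Dict Int (List Int))).items
      = (PySem.List.pyRange 0 num_machines 1).map (fun m => (m, ([] : List Int))) := by
  have := PySem.Dict.items_foldl_insert_fresh (PySem.List.pyRange 0 num_machines 1)
    (fun m => m) (fun _ => ([] : List Int)) PySem.Dict.empty
    (by intro a _; simp) (by simpa using PySem.List.nodup_pyRange_one 0 num_machines)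
  simpa using this

lemma mpt0_keys (num_machines : Int) :
    ((PySem.List.pyRange 0 num_machines 1).foldl (fun d m => d.insert m []) (PySem.Dict.empty : PySem.Dict Int (List Int))).keys
      = PySem.List.pyRange 0 num_machines 1 := by
  simp only [PySem.Dict.keys, mpt0_items, List.map_map]
  exact List.map_id _

lemma mpt0_getD (num_machines : Int) (c : Int) :
    ((PySem.List.pyRange 0 num_machines 1).foldl (fun d m => d.insert m []) (PySem.Dict.empty : PySem.Dict Int (List Int))).getD c []
      = [] := by
  by_cases hc : c ∈ PySem.List.pyRange 0 num_machines 1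
  · exact PySem.Dict.getD_of_mem_items _
      (by rw [mpt0_items]; exact List.mem_map_of_mem hc)
      (by rw [mpt0_keys]; exact PySem.List.nodup_pyRange_one 0 num_machines) []
  · exact PySem.Dict.getD_of_not_contains _ []
      (by rw [PySem.Dict.contains_eq_decide_mem_keys, mpt0_keys]; simp [hc])

-- the whole A-side bucket dict, characterised
lemma mpt_items (num_machines : Int) (pairs : List (Int × Int))
    (hpre : ∀ p ∈ pairs, 0 ≤ p.1 ∧ p.1 < num_machines) :
    (pairs.foldl (fun d mt => d.modify mt.1 [] (fun x => x ++ [mt.2]))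
        ((PySem.List.pyRange 0 num_machines 1).foldl (fun d m => d.insert m []) (PySem.Dict.empty : PySem.Dict Int (List Int)))).items
      = (PySem.List.pyRange 0 num_machines 1).map
          (fun m => (m, (pairs.filter (fun p => p.1 == m)).map (fun p => p.2))) := by
  have hkeys : (pairs.foldl (fun d mt => d.modify mt.1 [] (fun x => x ++ [mt.2]))
      ((PySem.List.pyRange 0 num_machines 1).foldl (fun d m => d.insert m []) (PySem.Dict.empty : PySem.Dict Int (List Int)))).keys
      = PySem.List.pyRange 0 num_machines 1 := by
    rw [PySem.Dict.keys_foldl_modify_key pairs (fun mt => mt.1) [] (fun _ mt => fun x => x ++ [mt.2]), mpt0_keys]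
    apply set_update_of_mem
    intro x hx
    rcases List.mem_map.mp hx with ⟨p, hp, rfl⟩
    exact PySem.List.mem_pyRange_one.mpr (hpre p hp)
  have hnd : (pairs.foldl (fun d mt => d.modify mt.1 [] (fun x => x ++ [mt.2]))
      ((PySem.List.pyRange 0 num_machines 1).foldl (fun d m => d.insert m []) (PySem.Dict.empty : PySem.Dict Int (List Int)))).keys.Nodup := by
    rw [hkeys]; exact PySem.List.nodup_pyRange_one 0 num_machines
  rw [PySem.Dict.items_eq_map_keys _ hnd [], hkeys]
  apply List.map_congr_left
  intro m _
  rw [PySem.Dict.getD_foldl_modify_append, mpt0_getD]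
  simp

-- the nested loop over jobs → operations → pairs is the loop over the flattened pair list
lemma foldl_nested (jobs : List (List (List (Int × Int))))
    (step : PySem.Dict Int (List Int) → (Int × Int) → PySem.Dict Int (List Int)) (d0 : PySem.Dict Int (List Int)) :
    jobs.foldl (fun d job => job.foldl (fun d op => op.foldl step d) d) d0
      = (jobs.flatMap (fun job => job.flatMap (fun op => op))).foldl step d0 := by
  simp [List.flatMap, List.foldl_flatten, List.foldl_map]

-- under Pre_, the concatenation of the per-machine buckets has the same members as the flat time list
lemma mem_flat (num_machines : Int) (pairs : List (Int × Int))
    (hpre : ∀ p ∈ pairs, 0 ≤ p.1 ∧ p.1 < num_machines) (x : Int) :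
    x ∈ (PySem.List.pyRange 0 num_machines 1).flatMap
        (fun m => (pairs.filter (fun p => p.1 == m)).map (fun p => p.2))
      ↔ x ∈ pairs.map (fun p => p.2) := by
  simp only [List.mem_flatMap, List.mem_map, List.mem_filter, PySem.List.mem_pyRange_one]
  constructor
  · rintro ⟨m, _, p, ⟨hp, _⟩, rfl⟩; exact ⟨p, hp, rfl⟩
  · rintro ⟨p, hp, rfl⟩; exact ⟨p.1, hpre p hp, p, ⟨hp, by simp⟩, rfl⟩

-- the branch on emptiness commutes with the insert
lemma foldl_insert_ite (l : List (Int × List Int)) (d : PySem.Dict Int (Int × Int))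
    (g : Int × Int) (v : List Int → Int × Int) :
    l.foldl (fun d p => if p.2 ≠ [] then d.insert p.1 (v p.2) else d.insert p.1 g) d
      = l.foldl (fun d p => d.insert p.1 (if p.2 ≠ [] then v p.2 else g)) d := by
  have h : (fun (d : PySem.Dict Int (Int × Int)) (p : Int × List Int) =>
      if p.2 ≠ [] then d.insert p.1 (v p.2) else d.insert p.1 g)
      = fun d p => d.insert p.1 (if p.2 ≠ [] then v p.2 else g) := by
    funext d p; split <;> rfl
  rw [h]

-- folding distinct machine keys into an empty dict and listing the items is a map over the keys
lemma final_fold (ks : List Int) (hnd : ks.Nodup) (tms : Int → List Int)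
    (g : Int × Int) (v : List Int → Int × Int) :
    ((ks.map (fun m => (m, tms m))).foldl
        (fun d p => if p.2 ≠ [] then d.insert p.1 (v p.2) else d.insert p.1 g)
        (PySem.Dict.empty : PySem.Dict Int (Int × Int))).items
      = ks.map (fun m => if tms m = [] then (m, g.1, g.2) else (m, (v (tms m)).1, (v (tms m)).2)) := by
  rw [foldl_insert_ite]
  refine Eq.trans (PySem.Dict.items_foldl_insert_fresh (ks.map (fun m => (m, tms m)))
      (fun p => p.1) (fun p => if p.2 ≠ [] then v p.2 else g)
      PySem.Dict.empty (by intro a _; simp) (by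
        have hc : ((fun (p : Int × List Int) => p.1) ∘ fun m => (m, tms m)) = fun m => m := rfl
        rw [List.map_map, hc]
        simpa using hnd)) ?_
  simp only [List.map_map]
  apply List.map_congr_left
  intro m _
  by_cases h : tms m = [] <;> simp [h, Function.comp]

-- B's result dict: fresh distinct keys, so items are the map over the range
lemma alt_items (num_machines : Int) (val : Int → Int × Int) :
    ((PySem.List.pyRange 0 num_machines 1).foldl (fun d m => d.insert m (val m))
        (PySem.Dict.empty : PySem.Dict Int (Int × Int))).items
      = (PySem.List.pyRange 0 num_machines 1).map (fun m => (m, val m)) := by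
  have := PySem.Dict.items_foldl_insert_fresh (PySem.List.pyRange 0 num_machines 1)
    (fun m => m) val PySem.Dict.empty
    (by intro a _; simp) (by simpa using PySem.List.nodup_pyRange_one 0 num_machines)
  simpa using this

-- head of a filter of the time-sorted list = the min of the filtered times
lemma head_filter_min (flat : List (Int × Int)) (q : Int × Int → Bool) :
    (((PySem.List.sorted flat (fun p => p.2) false).filter q).head?).map (fun p => p.2)
      = PySem.List.min? ((flat.filter q).map (fun p => p.2)) (fun t => t) := by
  have hperm : ((PySem.List.sorted flat (fun p => p.2) false).filter q).Perm (flat.filter q) :=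
    (PySem.List.sorted_perm flat (fun p => p.2) false).filter q
  cases hs : (PySem.List.sorted flat (fun p => p.2) false).filter q with
  | nil =>
      rw [hs] at hperm
      have hf : flat.filter q = [] := hperm.nil_eq.symm
      rw [hf]
      rfl
  | cons p t =>
      rw [hs] at hperm
      have hpair : (p :: t).Pairwise (fun a b : Int × Int => a.2 ≤ b.2) := by
        rw [← hs]
        exact (PySem.List.sorted_pairwise flat (fun p => p.2)).sublist (List.filter_sublist)
      have hple : ∀ x ∈ p :: t, p.2 ≤ x.2 := by
        intro x hx
        rcases List.mem_cons.mp hx with rfl | hx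
        · exact le_refl _
        · exact (List.pairwise_cons.mp hpair).1 x hx
      have hp2 : p.2 ∈ (flat.filter q).map (fun p => p.2) :=
        List.mem_map_of_mem (hperm.mem_iff.mp (List.mem_cons_self))
      cases hmin : PySem.List.min? ((flat.filter q).map (fun p => p.2)) (fun t => t) with
      | none =>
          rw [PySem.List.min?_eq_none_iff] at hmin
          rw [hmin] at hp2
          exact absurd hp2 (List.not_mem_nil)
      | some v =>
          have hv := PySem.List.min?_mem hmin
          rcases List.mem_map.mp hv with ⟨r, hr, rfl⟩
          have h1 : p.2 ≤ r.2 := hple r (hperm.mem_iff.mpr hr)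
          have h2 : r.2 ≤ p.2 := PySem.List.min?_isMin hmin p.2 hp2
          simp [le_antisymm h1 h2]

-- last of a filter of the time-sorted list = the max of the filtered times
lemma last_filter_max (flat : List (Int × Int)) (q : Int × Int → Bool) :
    (((PySem.List.sorted flat (fun p => p.2) false).filter q).getLast?).map (fun p => p.2)
      = PySem.List.max? ((flat.filter q).map (fun p => p.2)) (fun t => t) := by
  have hperm : ((PySem.List.sorted flat (fun p => p.2) false).filter q).Perm (flat.filter q) :=
    (PySem.List.sorted_perm flat (fun p => p.2) false).filter q
  rcases List.eq_nil_or_concat ((PySem.List.sorted flat (fun p => p.2) false).filter q) with hs | ⟨ys, p, hs⟩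
  · rw [hs] at hperm
    have hf : flat.filter q = [] := hperm.nil_eq.symm
    rw [hs, hf]
    rfl
  · rw [List.concat_eq_append] at hs
    rw [hs] at hperm
    have hpair : (ys ++ [p]).Pairwise (fun a b : Int × Int => a.2 ≤ b.2) := by
      rw [← hs]
      exact (PySem.List.sorted_pairwise flat (fun p => p.2)).sublist (List.filter_sublist)
    have hple : ∀ x ∈ ys ++ [p], x.2 ≤ p.2 := by
      intro x hx
      rcases List.mem_append.mp hx with hx | hx
      · exact (List.pairwise_append.mp hpair).2.2 x hx p (List.mem_singleton_self p)
      · rw [List.mem_singleton.mp hx]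
    have hp2 : p.2 ∈ (flat.filter q).map (fun p => p.2) :=
      List.mem_map_of_mem (hperm.mem_iff.mp (by simp))
    cases hmax : PySem.List.max? ((flat.filter q).map (fun p => p.2)) (fun t => t) with
    | none =>
        rw [PySem.List.max?_eq_none_iff] at hmax
        rw [hmax] at hp2
        exact absurd hp2 (List.not_mem_nil)
    | some v =>
        have hv := PySem.List.max?_mem hmax
        rcases List.mem_map.mp hv with ⟨r, hr, rfl⟩
        have h1 : r.2 ≤ p.2 := hple r (hperm.mem_iff.mpr hr)
        have h2 : p.2 ≤ r.2 := PySem.List.max?_isMax hmax p.2 hp2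
        rw [hs, List.getLast?_concat]
        simp [le_antisymm h2 h1]

-- the first-seen dict of B's sweep: its stored value is the head of the machine's filtered run
lemma fold_fst_get (s : List (Int × Int)) (f l : PySem.Dict Int Int) (m : Int) :
    ((s.foldl (fun fl p =>
        ((if fl.1.contains p.1 then fl.1 else fl.1.insert p.1 p.2), fl.2.insert p.1 p.2)) (f, l)).1).get? m
      = (f.get? m).or (((s.filter (fun p => p.1 == m)).head?).map (fun p => p.2)) := by
  induction s generalizing f l with
  | nil => simp
  | cons p t ih =>
      rw [List.foldl_cons, ih]
      by_cases hm : p.1 = m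
      · subst hm
        rw [List.filter_cons_of_pos (by simp)]
        by_cases hc : f.contains p.1
        · rw [if_pos hc]
          rw [PySem.Dict.contains_eq_isSome_get?] at hc
          rcases Option.isSome_iff_exists.mp hc with ⟨v, hv⟩
          simp [hv]
        · rw [if_neg hc]
          have hnone : f.get? p.1 = none := by
            rw [PySem.Dict.contains_eq_isSome_get?] at hc
            simpa using hc
          simp [PySem.Dict.get?_insert_self, hnone]
      · rw [List.filter_cons_of_neg (by simp [hm])]
        have hf' : (if f.contains p.1 then f else f.insert p.1 p.2).get? m = f.get? m := by
          split
          · rfl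
          · exact PySem.Dict.get?_insert_of_ne _ _ (Ne.symm hm)
        rw [hf']

-- the last-seen dict of B's sweep: its stored value is the last of the machine's filtered run
lemma fold_snd_get (s : List (Int × Int)) (f l : PySem.Dict Int Int) (m : Int) :
    ((s.foldl (fun fl p =>
        ((if fl.1.contains p.1 then fl.1 else fl.1.insert p.1 p.2), fl.2.insert p.1 p.2)) (f, l)).2).get? m
      = (((s.filter (fun p => p.1 == m)).getLast?).map (fun p => p.2)).or (l.get? m) := by
  induction s generalizing f l with
  | nil => simp
  | cons p t ih =>
      rw [List.foldl_cons, ih]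
      by_cases hm : p.1 = m
      · subst hm
        rw [List.filter_cons_of_pos (by simp)]
        cases htf : t.filter (fun p' => p'.1 == p.1) with
        | nil => simp [PySem.Dict.get?_insert_self]
        | cons r rs =>
            rw [List.getLast?_cons_cons]
            cases hx : (r :: rs).getLast? with
            | none => exact absurd hx (by simp)
            | some x => simp [PySem.Dict.get?_insert_self]
      · rw [List.filter_cons_of_neg (by simp [hm])]
        rw [PySem.Dict.get?_insert_of_ne _ _ (Ne.symm hm)]

-- ===== VERDICT =====
theorem calculate_min_max_processing_times_per_machine_spec : Claim_equal_calculate_min_max_processing_times_per_machine := by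
  intro num_machines jobs _ hpre
  unfold Spec_calculate_min_max_processing_times_per_machine
  have hpre' : ∀ p ∈ jobs.flatMap (fun job => job.flatMap (fun op => op)), 0 ≤ p.1 ∧ p.1 < num_machines := by
    intro p hp
    simp only [List.mem_flatMap] at hp
    rcases hp with ⟨job, hj, op, ho, hp⟩
    exact hpre job hj op ho p hp
  simp only [calculate_min_max_processing_times_per_machine, calculate_min_max_processing_times_per_machine_alt]
  rw [foldl_nested]
  rw [mpt_items num_machines _ hpre']
  simp only [PySem.Dict.values]
  rw [mpt_items num_machines _ hpre']
  simp only [List.map_map, List.flatMap_map, Function.comp, filter_const_ne_nil]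
  rw [min?_id_congr _ _ (mem_flat num_machines _ hpre'), max?_id_congr _ _ (mem_flat num_machines _ hpre')]
  rw [final_fold (PySem.List.pyRange 0 num_machines 1) (PySem.List.nodup_pyRange_one 0 num_machines)
    (fun m => ((jobs.flatMap (fun job => job.flatMap (fun op => op))).filter (fun p => p.1 == m)).map (fun p => p.2))
    ((PySem.List.min? ((jobs.flatMap (fun job => job.flatMap (fun op => op))).map (fun p => p.2)) (fun t => t)).getD 10,
     (PySem.List.max? ((jobs.flatMap (fun job => job.flatMap (fun op => op))).map (fun p => p.2)) (fun t => t)).getD 100)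
    (fun l => ((PySem.List.min? l (fun t => t)).getD 0, (PySem.List.max? l (fun t => t)).getD 0))]
  rw [alt_items]
  set flat := jobs.flatMap (fun job => job.flatMap (fun op => op)) with hflat
  set s := PySem.List.sorted flat (fun p => p.2) false with hsdef
  have hgmin : (if s ≠ [] then ((PySem.List.pyGet? s 0).map (fun p => p.2)).getD 0 else 10)
      = (PySem.List.min? (flat.map (fun p => p.2)) (fun t => t)).getD 10 := by
    have hh := head_filter_min flat (fun _ => true)
    rw [List.filter_true, List.filter_true, ← hsdef] at hh
    cases hcase : s with
    | nil =>
        rw [if_neg (by simp)]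
        have hfe : flat = [] := ((hcase ▸ (hsdef ▸ PySem.List.sorted_perm flat (fun p => p.2) false : s.Perm flat)).nil_eq).symm
        rw [hfe]
        rfl
    | cons p t =>
        rw [if_pos (by simp)]
        rw [hcase] at hh
        rw [PySem.List.pyGet?_zero_cons]
        simp only [List.head?_cons, Option.map_some] at hh
        rw [← hh]
        rfl
  have hgmax : (if s ≠ [] then ((PySem.List.pyGet? s (-1)).map (fun p => p.2)).getD 0 else 100)
      = (PySem.List.max? (flat.map (fun p => p.2)) (fun t => t)).getD 100 := by
    have hh := last_filter_max flat (fun _ => true)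
    rw [List.filter_true, List.filter_true, ← hsdef] at hh
    cases hcase : s with
    | nil =>
        rw [if_neg (by simp)]
        have hfe : flat = [] := ((hcase ▸ (hsdef ▸ PySem.List.sorted_perm flat (fun p => p.2) false : s.Perm flat)).nil_eq).symm
        rw [hfe]
        rfl
    | cons p t =>
        rw [if_pos (by simp)]
        rw [hcase] at hh
        rw [PySem.List.pyGet?_neg_one]
        cases hlast : (p :: t).getLast? with
        | none => exact absurd hlast (by simp)
        | some r =>
            rw [hlast] at hh
            simp only [Option.map_some] at hh
            rw [← hh]
            rfl
  rw [hgmin, hgmax]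
  apply List.map_congr_left
  intro m hm
  have hfst := fold_fst_get s PySem.Dict.empty PySem.Dict.empty m
  rw [PySem.Dict.get?_empty, Option.none_or] at hfst
  have hsnd := fold_snd_get s PySem.Dict.empty PySem.Dict.empty m
  rw [PySem.Dict.get?_empty, Option.or_none] at hsnd
  have hminm := head_filter_min flat (fun p => p.1 == m)
  have hmaxm := last_filter_max flat (fun p => p.1 == m)
  rw [← hsdef] at hminm hmaxm
  rw [hminm] at hfst
  rw [hmaxm] at hsnd
  have hcont : ((s.foldl (fun fl p =>
        ((if fl.1.contains p.1 then fl.1 else fl.1.insert p.1 p.2), fl.2.insert p.1 p.2))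
        (PySem.Dict.empty, PySem.Dict.empty)).1).contains m
      = (PySem.List.min? ((flat.filter (fun p => p.1 == m)).map (fun p => p.2)) (fun t => t)).isSome := by
    rw [PySem.Dict.contains_eq_isSome_get?, hfst]
  by_cases hb : (flat.filter (fun p => p.1 == m)).map (fun p => p.2) = []
  · have hnone : PySem.List.min? ((flat.filter (fun p => p.1 == m)).map (fun p => p.2)) (fun t => t) = none := by
      rw [PySem.List.min?_eq_none_iff]
      exact hb
    rw [if_pos hb, if_neg (by rw [hcont, hnone]; simp)]
  · have hsome : (PySem.List.min? ((flat.filter (fun p => p.1 == m)).map (fun p => p.2)) (fun t => t)).isSome := by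
      cases hmin : PySem.List.min? ((flat.filter (fun p => p.1 == m)).map (fun p => p.2)) (fun t => t) with
      | none =>
          rw [PySem.List.min?_eq_none_iff] at hmin
          exact absurd hmin hb
      | some v => rfl
    rw [if_neg hb, if_pos (by rw [hcont]; exact hsome), hfst, hsnd]
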